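-- pv_equiv track=rewrite | github.com/Ari-S-123/PCINN | literature_curve_kinetics_models.py | axis_label_to_column_name
-- ===== SOURCE A (Python) =====
-- def normalize_axis_label(label: str) -> str:
--     return label.replace("\\", "").strip()
--
-- def axis_label_to_column_name(label: str) -> str:
--     label = normalize_axis_label(label)
--     replacements = {
--         "t_res": "t_res",
--         "time(min)": "time_min",
--         "time(h)": "time_h",
--         "-ln(1-conversion)": "negln_1_minus_conversion",
--     }
--     if label in replacements:
--         return replacements[label]
--
--     sanitized = (
--         label.replace("(", "_")
--         .replace(")", "")
--         .replace("-", "_")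
--         .replace("/", "_")
--         .replace(" ", "_")
--         .replace(",", "_")
--         .replace(".", "_")
--     )
--     while "__" in sanitized:
--         sanitized = sanitized.replace("__", "_")
--     return sanitized.strip("_").lower()
-- ===== SOURCE B (Python) =====
-- def normalize_axis_label(label: str) -> str:
--     return label.replace("\\", "").strip()
--
-- def axis_label_to_column_name(label: str) -> str:
--     label = normalize_axis_label(label)
--     replacements = {
--         "t_res": "t_res",
--         "time(min)": "time_min",
--         "time(h)": "time_h",
--         "-ln(1-conversion)": "negln_1_minus_conversion",
--     }
--     if label in replacements:
--         return replacements[label]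
--
--     parts = []
--     prev_us = False
--     for ch in label:
--         if ch == ')':
--             continue
--         out = '_' if ch in "(-/ ,." else ch
--         if out == '_' and prev_us:
--             continue
--         parts.append(out)
--         prev_us = out == '_'
--     return ''.join(parts).strip('_').lower()
-- ===== Notes on version B (the rewrite author's own statement) =====
-- stated objective: simpler
-- what changed: A's seven sequential str.replace passes plus a '__'-collapsing while-loop of repeated replaces are replaced by a single character-by-character scan that skips ')', maps separators to '_', and uses a previous-was-underscore flag to collapse runs in the same pass.
import Mathlib
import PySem

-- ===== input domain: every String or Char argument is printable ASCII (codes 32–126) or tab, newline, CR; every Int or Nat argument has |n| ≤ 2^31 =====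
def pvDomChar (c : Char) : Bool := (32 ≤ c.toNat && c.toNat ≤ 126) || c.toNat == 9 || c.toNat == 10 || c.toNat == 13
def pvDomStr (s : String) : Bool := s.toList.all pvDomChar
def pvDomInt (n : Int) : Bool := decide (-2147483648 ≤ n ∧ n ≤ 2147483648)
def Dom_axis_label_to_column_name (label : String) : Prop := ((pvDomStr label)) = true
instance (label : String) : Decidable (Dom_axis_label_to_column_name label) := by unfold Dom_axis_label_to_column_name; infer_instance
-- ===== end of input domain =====

-- B replaces A's seven sequential str.replace passes plus the '__'-collapsing while-loop by a single
-- character-by-character scan with a previous-was-underscore flag (objective: simpler one-pass algorithm).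

-- ===== PORT A =====
def normalize_axis_label (label : String) : String :=
  PySem.Str.strip (PySem.Str.replace label "\\" "")

-- helper used only to state/prove the termination fact the while-loop port cites:
-- rep2 is what one pass of  s.replace("__", "_")  computes (proved in go_pair_eq_rep2 below)
def rep2 : List Char → List Char
  | [] => []
  | [c] => [c]
  | c :: d :: t => if c = '_' ∧ d = '_' then '_' :: rep2 t else c :: rep2 (d :: t)
termination_by l => l.length

theorem rep2_length_le (l : List Char) : (rep2 l).length ≤ l.length := by
  induction l using rep2.induct with
  | case1 => simp [rep2]
  | case2 c => simp [rep2]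
  | case3 c d t h ih =>
    simp only [rep2, if_pos h, List.length_cons]
    omega
  | case4 c d t h ih =>
    simp only [rep2, if_neg h, List.length_cons]
    simp only [List.length_cons] at ih
    omega

theorem go_pair_eq_rep2 (fuel : Nat) (l acc : List Char) (h : l.length ≤ fuel) :
    PySem.Chars.replace.go ['_','_'] ['_'] fuel l acc = acc.reverse ++ rep2 l := by
  induction fuel generalizing l acc with
  | zero =>
    have : l = [] := List.eq_nil_of_length_eq_zero (Nat.le_zero.mp h)
    subst this; simp [PySem.Chars.replace.go, rep2]
  | succ fuel ih =>
    match l with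
    | [] => simp [PySem.Chars.replace.go, rep2]
    | c :: t =>
      rw [PySem.Chars.replace.go]
      by_cases hp : List.isPrefixOf ['_','_'] (c :: t) = true
      · have hpre : ['_','_'] <+: c :: t := by
          exact (List.isPrefixOf_iff_prefix).mp hp
        obtain ⟨r, hr⟩ := hpre
        simp only [List.cons_append, List.nil_append, List.cons.injEq] at hr
        obtain ⟨hc, ht⟩ := hr
        subst hc
        subst ht
        rw [if_pos hp]
        have hlen : r.length ≤ fuel := by simp at h; omega
        rw [show (['_','_'] : List Char).length = 2 from rfl]
        show PySem.Chars.replace.go ['_','_'] ['_'] fuel r ('_' :: acc) = _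
        rw [ih _ _ hlen]
        simp [rep2]
      · rw [if_neg hp]
        have hlen : t.length ≤ fuel := by simp at h; omega
        rw [ih _ _ hlen]
        have : rep2 (c :: t) = c :: rep2 t := by
          match t with
          | [] => simp [rep2]
          | d :: t' =>
            rw [rep2]
            rw [if_neg]
            intro ⟨h1, h2⟩
            subst h1; subst h2
            simp [List.isPrefixOf] at hp
        rw [this]; simp

theorem replace_pair_eq_rep2 (l : List Char) :
    PySem.Chars.replace l ['_','_'] ['_'] = rep2 l := by
  rw [PySem.Chars.replace]
  simp only [List.isEmpty_cons, Bool.false_eq_true, if_false]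
  exact go_pair_eq_rep2 l.length l [] le_rfl

theorem rep2_length_lt (l : List Char) (h : ['_','_'] <:+: l) :
    (rep2 l).length < l.length := by
  induction l using rep2.induct with
  | case1 => simp at h
  | case2 c =>
    exfalso
    have := h.length_le
    simp at this
  | case3 c d t hcd ih =>
    simp only [rep2, if_pos hcd, List.length_cons]
    have := rep2_length_le t
    omega
  | case4 c d t hcd ih =>
    simp only [rep2, if_neg hcd, List.length_cons]
    simp only [List.length_cons] at ih
    have hinf : ['_','_'] <:+: d :: t := by
      rcases List.infix_cons_iff.mp h with hpre | hinf
      · exfalso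
        obtain ⟨r, hr⟩ := hpre
        simp at hr
        exact hcd ⟨hr.1.symm, hr.2.1.symm⟩
      · exact hinf
    have := ih hinf
    omega

theorem replace_pair_shrinks (s : List Char) (h : PySem.Chars.isIn ['_','_'] s = true) :
    (PySem.Chars.replace s ['_','_'] ['_']).length < s.length := by
  rw [replace_pair_eq_rep2]
  exact rep2_length_lt s ((PySem.Chars.isIn_iff_infix _ _).mp h)

-- port of A's  `while "__" in sanitized: sanitized = sanitized.replace("__", "_")`
def collapseA (s : List Char) : List Char :=
  if h : PySem.Chars.isIn ['_','_'] s = true then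
    collapseA (PySem.Chars.replace s ['_','_'] ['_'])
  else s
termination_by s.length
decreasing_by exact replace_pair_shrinks s h

def axis_label_to_column_name (label : String) : String :=
  let label := normalize_axis_label label
  let replacements : PySem.Dict String String :=
    PySem.Dict.ofList
      [("t_res", "t_res"), ("time(min)", "time_min"), ("time(h)", "time_h"),
       ("-ln(1-conversion)", "negln_1_minus_conversion")]
  match replacements.get? label with
  | some v => v
  | none =>
    let sanitized :=
      PySem.Chars.replace (PySem.Chars.replace (PySem.Chars.replace (PySem.Chars.replace
        (PySem.Chars.replace (PySem.Chars.replace (PySem.Chars.replace label.toList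
          ['('] ['_']) [')'] []) ['-'] ['_']) ['/'] ['_']) [' '] ['_']) [','] ['_']) ['.'] ['_']
    String.mk (PySem.Chars.lower (PySem.Chars.stripChars (collapseA sanitized) ['_']))

-- ===== PORT B =====
-- one step of B's for-loop: state = (emitted chars, previous-emitted-was-underscore flag)
def bStep (st : List Char × Bool) (ch : Char) : List Char × Bool :=
  if ch = ')' then st
  else
    let out := if ['(', '-', '/', ' ', ',', '.'].contains ch then '_' else ch
    if out = '_' && st.2 then st
    else (st.1 ++ [out], out = '_')

def axis_label_to_column_name_alt (label : String) : String :=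
  let label := normalize_axis_label label
  let replacements : PySem.Dict String String :=
    PySem.Dict.ofList
      [("t_res", "t_res"), ("time(min)", "time_min"), ("time(h)", "time_h"),
       ("-ln(1-conversion)", "negln_1_minus_conversion")]
  match replacements.get? label with
  | some v => v
  | none =>
    let parts := (label.toList.foldl bStep ([], false)).1
    String.mk (PySem.Chars.lower (PySem.Chars.stripChars parts ['_']))

-- ===== PRECONDITION & SPEC =====
def Spec_axis_label_to_column_name (label : String) (out : String) : Prop := out = axis_label_to_column_name_alt label
instance (label : String) (out : String) : Decidable (Spec_axis_label_to_column_name label out) := by unfold Spec_axis_label_to_column_name; infer_instance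

-- ===== CLAIM (what is proved, stated in full; the proofs are below) =====
def Claim_equal_axis_label_to_column_name : Prop := ∀ (label : String), Dom_axis_label_to_column_name label → Spec_axis_label_to_column_name label (axis_label_to_column_name label)

-- ===== LEMMAS AND PROOFS =====

-- per-character effect of A's seven replace passes
def sanChar (c : Char) : List Char :=
  if c = ')' then [] else if ['(', '-', '/', ' ', ',', '.'].contains c then ['_'] else [c]

-- underscore-run collapsing with a previous-was-underscore flag
def squeezeF : List Char → Bool → List Char
  | [], _ => []
  | c :: t, prev =>
    if c = '_' then (if prev then squeezeF t true else '_' :: squeezeF t true)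
    else c :: squeezeF t false

theorem go_single_eq_flatMap (c : Char) (new : List Char) (fuel : Nat) (l acc : List Char)
    (h : l.length ≤ fuel) :
    PySem.Chars.replace.go [c] new fuel l acc
      = acc.reverse ++ l.flatMap (fun x => if x = c then new else [x]) := by
  induction fuel generalizing l acc with
  | zero =>
    have : l = [] := List.eq_nil_of_length_eq_zero (Nat.le_zero.mp h)
    subst this; simp [PySem.Chars.replace.go]
  | succ fuel ih =>
    match l with
    | [] => simp [PySem.Chars.replace.go]
    | x :: t =>
      rw [PySem.Chars.replace.go]
      have hlen : t.length ≤ fuel := by simp at h; omega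
      by_cases hx : x = c
      · subst hx
        have hp : List.isPrefixOf [x] (x :: t) = true := by simp [List.isPrefixOf]
        rw [if_pos hp]
        rw [ih _ _ (by simpa using hlen)]
        simp
      · have hp : ¬ List.isPrefixOf [c] (x :: t) = true := by
          simp [List.isPrefixOf]; exact fun h' => hx h'.symm
        rw [if_neg hp, ih _ _ hlen]
        simp [hx]

theorem replace_single_eq_flatMap (l : List Char) (c : Char) (new : List Char) :
    PySem.Chars.replace l [c] new = l.flatMap (fun x => if x = c then new else [x]) := by
  rw [PySem.Chars.replace]
  simp only [List.isEmpty_cons, Bool.false_eq_true, if_false]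
  exact go_single_eq_flatMap c new l.length l [] le_rfl

-- A's seven passes are one pass with sanChar
theorem chain_eq_flatMap_sanChar (l : List Char) :
    PySem.Chars.replace (PySem.Chars.replace (PySem.Chars.replace (PySem.Chars.replace
      (PySem.Chars.replace (PySem.Chars.replace (PySem.Chars.replace l
        ['('] ['_']) [')'] []) ['-'] ['_']) ['/'] ['_']) [' '] ['_']) [','] ['_']) ['.'] ['_']
      = l.flatMap sanChar := by
  simp only [replace_single_eq_flatMap, List.flatMap_assoc]
  apply List.flatMap_congr
  intro c _
  by_cases h1 : c = '(' <;> by_cases h2 : c = ')' <;> by_cases h3 : c = '-' <;>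
    by_cases h4 : c = '/' <;> by_cases h5 : c = ' ' <;> by_cases h6 : c = ',' <;>
    by_cases h7 : c = '.' <;>
    simp_all [sanChar]

-- one replace("__","_") pass does not change the collapsed form
theorem squeezeF_rep2 (l : List Char) (prev : Bool) :
    squeezeF (rep2 l) prev = squeezeF l prev := by
  induction l using rep2.induct generalizing prev with
  | case1 => simp [rep2]
  | case2 c => simp [rep2]
  | case3 c d t h ih =>
    obtain ⟨hc, hd⟩ := h; subst hc; subst hd
    rw [rep2, if_pos ⟨rfl, rfl⟩]
    cases prev with
    | false => simp [squeezeF, ih]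
    | true => simp [squeezeF, ih]
  | case4 c d t h ih =>
    rw [rep2, if_neg h]
    by_cases hc : c = '_'
    · subst hc
      cases prev with
      | false => simp [squeezeF, ih]
      | true => simp [squeezeF, ih]
    · simp [squeezeF, hc, ih]

-- a string without "__" is already collapsed
theorem squeezeF_id (l : List Char) (prev : Bool) (h : ¬ (['_','_'] <:+: l))
    (hp : prev = true → ¬ (∃ t, l = '_' :: t)) : squeezeF l prev = l := by
  induction l generalizing prev with
  | nil => simp [squeezeF]
  | cons c t ih =>
    by_cases hc : c = '_'
    · subst hc
      have hprev : prev = false := by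
        cases prev
        · rfl
        · exact absurd ⟨t, rfl⟩ (hp rfl)
      subst hprev
      have hstep : squeezeF ('_' :: t) false = '_' :: squeezeF t true := by
        simp [squeezeF]
      rw [hstep]
      congr 1
      apply ih
      · intro hinf
        exact h (List.infix_cons hinf)
      · rintro _ ⟨t', ht'⟩
        subst ht'
        exact h ⟨[], t', rfl⟩
    · have hstep : squeezeF (c :: t) prev = c :: squeezeF t false := by
        simp [squeezeF, hc]
      rw [hstep]
      congr 1
      apply ih
      · intro hinf
        exact h (List.infix_cons hinf)
      · simp

-- A's while-loop computes the collapsed form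
theorem collapseA_eq_squeezeF (l : List Char) : collapseA l = squeezeF l false := by
  induction l using collapseA.induct with
  | case1 l h ih =>
    rw [collapseA, dif_pos h, ih, replace_pair_eq_rep2, squeezeF_rep2]
  | case2 l h =>
    rw [collapseA, dif_neg h]
    have hninf : ¬ (['_','_'] <:+: l) := by
      intro hinf
      exact h ((PySem.Chars.isIn_iff_infix _ _).mpr hinf)
    exact (squeezeF_id l false hninf (by simp)).symm

-- B's fused scan, recursively (what the foldl computes)
def bScan : List Char → Bool → List Char
  | [], _ => []
  | c :: t, prev =>
    if c = ')' then bScan t prev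
    else
      let out := if ['(', '-', '/', ' ', ',', '.'].contains c then '_' else c
      if out = '_' ∧ prev then bScan t prev
      else out :: bScan t (out = '_')

theorem foldl_bStep_fst (l : List Char) (acc : List Char) (prev : Bool) :
    (l.foldl bStep (acc, prev)).1 = acc ++ bScan l prev := by
  induction l generalizing acc prev with
  | nil => simp [bScan]
  | cons c t ih =>
    simp only [List.foldl_cons, bStep, bScan]
    by_cases hc : c = ')'
    · simp [hc, ih]
    · simp only [if_neg hc]
      set out := if ['(', '-', '/', ' ', ',', '.'].contains c then '_' else c with hout
      by_cases hskip : out = '_' ∧ prev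
      · have : (out = '_' && prev) = true := by simp [hskip.1, hskip.2]
        rw [if_pos this, if_pos hskip, ih]
      · have : ¬ ((out = '_' && prev) = true) := by
          simp only [Bool.and_eq_true, decide_eq_true_eq]
          intro ⟨h1, h2⟩; exact hskip ⟨h1, h2⟩
        rw [if_neg this, if_neg hskip, ih]
        simp

-- B's scan is the collapse of A's one-pass sanitization
theorem bScan_eq_squeezeF_flatMap (l : List Char) (prev : Bool) :
    bScan l prev = squeezeF (l.flatMap sanChar) prev := by
  induction l generalizing prev with
  | nil => simp [bScan, squeezeF]
  | cons c t ih =>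
    simp only [bScan, List.flatMap_cons, sanChar]
    by_cases hc : c = ')'
    · simp [hc, ih]
    · simp only [if_neg hc]
      by_cases hm : ['(', '-', '/', ' ', ',', '.'].contains c
      · simp only [hm, if_true]
        cases prev with
        | true => simp [squeezeF, ih]
        | false => simp [squeezeF, ih]
      · simp only [hm, if_false, Bool.false_eq_true]
        by_cases hu : c = '_'
        · subst hu
          cases prev with
          | true => simp [squeezeF, ih]
          | false => simp [squeezeF, ih]
        · simp [squeezeF, hu, ih]

-- ===== VERDICT (by name: the statement is the Claim_ definition above) =====
theorem axis_label_to_column_name_spec : Claim_equal_axis_label_to_column_name := by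
  intro label _
  unfold Spec_axis_label_to_column_name
  unfold axis_label_to_column_name axis_label_to_column_name_alt
  cases hm : (PySem.Dict.ofList
      [("t_res", "t_res"), ("time(min)", "time_min"), ("time(h)", "time_h"),
       ("-ln(1-conversion)", "negln_1_minus_conversion")] :
      PySem.Dict String String).get? (normalize_axis_label label) with
  | some v => simp [hm]
  | none =>
    simp only [hm]
    rw [chain_eq_flatMap_sanChar, collapseA_eq_squeezeF,
      foldl_bStep_fst, bScan_eq_squeezeF_flatMap]
    simp
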